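-- pv_equiv track=rewrite | github.com/crcx/punga | parable.py | condense_lines
-- ===== SOURCE A (Python) =====
-- def condense_lines(code):
--     """Take an array of code, join lines ending with a \, and return"""
--     """the new array"""
--     s = ''
--     r = []
--     i = 0
--     while i < len(code):
--         braces = 0
--         if code[i].endswith(' \\\n'):
--             s = s + ' ' + code[i][:-2].strip()
--         else:
--             s = s + ' ' + code[i].strip()
--         tokens = s.split(' ')
--         for t in tokens:
--             if t == '[':
--                 braces = braces + 1
--             if t == ']':
--                 braces = braces - 1
--         if braces == 0:
--             r.append(s.strip())
--             s = ''
--         i = i + 1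
--     return r
-- ===== SOURCE B (Python) =====
-- def condense_lines(code):
--     """Staged: first normalize every line to its stripped piece, then group
--     pieces by a running bracket balance computed with list.count, joining
--     each balanced group with ' '.join at the end."""
--     pieces = [ln[:-2].strip() if ln.endswith(' \\\n') else ln.strip() for ln in code]
--     r = []
--     group = []
--     bal = 0
--     for p in pieces:
--         group.append(p)
--         toks = p.split(' ')
--         bal += toks.count('[') - toks.count(']')
--         if bal == 0:
--             r.append(' '.join(group).strip())
--             group = []
--     return r
-- ===== Notes on version B (the rewrite author's own statement) =====
-- stated objective: alternative
-- what changed: B is staged: a first pass maps every line to its stripped piece, then a single grouping pass keeps a group list and a running bracket balance computed with list.count on each new piece's tokens, joining the group with ' '.join when balanced — instead of A's re-splitting and re-counting the whole accumulated string on every line.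
import Mathlib
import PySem

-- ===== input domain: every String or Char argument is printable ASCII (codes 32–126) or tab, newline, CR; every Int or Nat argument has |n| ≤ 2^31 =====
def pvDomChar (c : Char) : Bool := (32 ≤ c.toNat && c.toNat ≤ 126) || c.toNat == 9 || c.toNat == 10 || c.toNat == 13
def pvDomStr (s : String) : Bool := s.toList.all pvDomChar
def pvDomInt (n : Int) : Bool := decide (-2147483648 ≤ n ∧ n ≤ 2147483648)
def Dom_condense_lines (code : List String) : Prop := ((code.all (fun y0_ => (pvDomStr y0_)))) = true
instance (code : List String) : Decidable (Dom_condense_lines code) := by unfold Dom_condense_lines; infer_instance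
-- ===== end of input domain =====

-- B restructures A into staged passes: a map normalizing each line to its stripped
-- piece, then one grouping pass with a running bracket balance (via list.count on the
-- piece's tokens) that joins each balanced group, instead of A's re-splitting and
-- re-counting the whole accumulated string every line (alternative decomposition).
-- Strings are worked on as List Char (PySem.Chars) per the PySem convention.

-- ===== PORT A =====
-- the body of A's 'for t in tokens' loop (two independent ifs)
def pvBracesStepA (b : Int) (t : List Char) : Int :=
  let b1 := if t = ['['] then b + 1 else b
  if t = [']'] then b1 - 1 else b1

-- the body of A's while loop, state (s, r)
def pvStepA (st : List Char × List String) (line : String) : List Char × List String :=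
  let s := if PySem.Chars.endswith line.toList [' ', '\\', '\n'] = true
           then st.1 ++ ' ' :: PySem.Chars.strip (PySem.Chars.slice line.toList none (some (-2)))
           else st.1 ++ ' ' :: PySem.Chars.strip line.toList
  let tokens := PySem.Chars.splitOn s [' ']
  let braces := tokens.foldl pvBracesStepA 0
  if braces = 0 then ([], st.2 ++ [String.ofList (PySem.Chars.strip s)])
  else (s, st.2)

def condense_lines (code : List String) : List String :=
  (code.foldl pvStepA ([], [])).2

-- ===== PORT B =====
-- B's first stage: the list-comprehension normalizing a line to its stripped piece
def pvPiece (line : String) : List Char :=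
  if PySem.Chars.endswith line.toList [' ', '\\', '\n'] = true
  then PySem.Chars.strip (PySem.Chars.slice line.toList none (some (-2)))
  else PySem.Chars.strip line.toList

-- the body of B's grouping loop, state (group, bal, r)
def pvGroupStep (st : List (List Char) × Int × List String) (p : List Char) :
    List (List Char) × Int × List String :=
  let group := st.1 ++ [p]
  let toks := PySem.Chars.splitOn p [' ']
  let bal := st.2.1 + (PySem.List.count toks ['['] : Int) - (PySem.List.count toks [']'] : Int)
  if bal = 0 then
    ([], bal, st.2.2 ++ [String.ofList (PySem.Chars.strip (PySem.Chars.join [' '] group))])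
  else (group, bal, st.2.2)

def condense_lines_alt (code : List String) : List String :=
  ((code.map pvPiece).foldl pvGroupStep ([], 0, [])).2.2

-- ===== PRECONDITION & SPEC =====
def Spec_condense_lines (code : List String) (out : List String) : Prop := out = condense_lines_alt code
instance (code : List String) (out : List String) : Decidable (Spec_condense_lines code out) := by unfold Spec_condense_lines; infer_instance

-- ===== CLAIM (what is proved, stated in full; the proofs are below) =====
def Claim_equal_condense_lines : Prop := ∀ (code : List String), Dom_condense_lines code → Spec_condense_lines code (condense_lines code)

-- ===== LEMMAS AND PROOFS =====

-- proof-side characterization of Python's s.split(' '): tokens between single spaces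
def sp : List Char → List (List Char)
  | [] => [[]]
  | c :: rest => if c = ' ' then [] :: sp rest else (sp rest).modifyHead (c :: ·)

theorem sp_ne_nil (l : List Char) : sp l ≠ [] := by
  cases l with
  | nil => simp [sp]
  | cons c rest =>
    simp only [sp]
    split
    · simp
    · cases h : sp rest with
      | nil => exact absurd h (sp_ne_nil rest)
      | cons a t => simp

theorem go_spec (l : List Char) (fuel : Nat) (cur : List Char) (acc : List (List Char))
    (h : l.length < fuel) :
    PySem.Chars.splitOn.go [' '] fuel l cur acc
      = acc.reverse ++ (sp l).modifyHead (cur.reverse ++ ·) := by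
  induction l generalizing fuel cur acc with
  | nil =>
    cases fuel with
    | zero => omega
    | succ f => simp [PySem.Chars.splitOn.go, sp]
  | cons c rest ih =>
    cases fuel with
    | zero => omega
    | succ f =>
      rw [PySem.Chars.splitOn.go]
      have hr : rest.length < f := by simpa using h
      by_cases hc : c = ' '
      · subst hc
        have hp : [' '].isPrefixOf (' ' :: rest) = true := by
          simp [List.isPrefixOf]
        rw [if_pos hp]
        simp only [List.length_cons, List.length_nil, List.drop_succ_cons, List.drop_zero]
        rw [ih _ [] _ hr]
        cases hs : sp rest with
        | nil => exact absurd hs (sp_ne_nil rest)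
        | cons a t => simp [sp, hs]
      · have hp : [' '].isPrefixOf (c :: rest) = false := by
          simp [List.isPrefixOf]
          exact fun hh => hc hh.symm
        rw [if_neg (by simp [hp])]
        rw [ih _ _ _ hr]
        cases hs : sp rest with
        | nil => exact absurd hs (sp_ne_nil rest)
        | cons a t => simp [sp, hs, hc]

theorem splitOn_sp (s : List Char) :
    PySem.Chars.splitOn s [' '] = sp s := by
  rw [PySem.Chars.splitOn, go_spec _ _ _ _ (by omega)]
  cases hs : sp s with
  | nil => exact absurd hs (sp_ne_nil s)
  | cons a t => simp

theorem sp_append (a b : List Char) : sp (a ++ ' ' :: b) = sp a ++ sp b := by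
  induction a with
  | nil => simp [sp]
  | cons c a ih =>
    by_cases hc : c = ' '
    · simp [sp, hc, ih]
    · cases ha : sp a with
      | nil => exact absurd ha (sp_ne_nil a)
      | cons x t => simp [sp, hc, ih, ha]

-- A's token loop computed as the two token counts B uses
theorem foldlA_count (ts : List (List Char)) (b : Int) :
    ts.foldl pvBracesStepA b
      = b + (PySem.List.count ts ['['] : Int) - (PySem.List.count ts [']'] : Int) := by
  induction ts generalizing b with
  | nil => simp [PySem.List.count]
  | cons t ts ih =>
    rw [List.foldl_cons, ih]
    by_cases h1 : t = ['[']
    · subst h1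
      simp [pvBracesStepA, PySem.List.count]
      omega
    · by_cases h2 : t = [']']
      · subst h2
        simp [pvBracesStepA, PySem.List.count]
        omega
      · simp [pvBracesStepA, h1, h2, PySem.List.count]

-- A's accumulated string for a group of pieces
def flattenS (g : List (List Char)) : List Char := (g.map (' ' :: ·)).flatten

theorem flattenS_append (g : List (List Char)) (p : List Char) :
    flattenS (g ++ [p]) = flattenS g ++ ' ' :: p := by
  simp [flattenS]

theorem flattenS_eq_cons_join (g : List (List Char)) (hg : g ≠ []) :
    flattenS g = ' ' :: PySem.Chars.join [' '] g := by
  induction g with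
  | nil => exact absurd rfl hg
  | cons p rest ih =>
    cases rest with
    | nil => simp [flattenS, PySem.Chars.join_singleton]
    | cons q t =>
      rw [PySem.Chars.join_cons_cons]
      have := ih (by simp)
      simp only [flattenS, List.map_cons, List.flatten_cons] at this ⊢
      rw [this]
      simp

theorem strip_cons_space (x : List Char) :
    PySem.Chars.strip (' ' :: x) = PySem.Chars.strip x := by
  simp [PySem.Chars.strip, PySem.Chars.lstrip,
        show PySem.Chars.isspace ' ' = true from by decide]

-- balance of the empty accumulated string is 0
theorem balA_nil : (sp ([] : List Char)).foldl pvBracesStepA 0 = 0 := by decide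

-- the grouping invariant: B's (group, bal) mirror A's accumulated string and its balance
theorem key (code : List String) (g : List (List Char)) (b : Int) (r : List String)
    (hb : b = (sp (flattenS g)).foldl pvBracesStepA 0) :
    ((code.map pvPiece).foldl pvGroupStep (g, b, r)).2.2
      = (code.foldl pvStepA (flattenS g, r)).2 := by
  induction code generalizing g b r with
  | nil => simp
  | cons line rest ih =>
    rw [List.map_cons, List.foldl_cons, List.foldl_cons]
    have hstepA : pvStepA (flattenS g, r) line =
        (if (sp (flattenS (g ++ [pvPiece line]))).foldl pvBracesStepA 0 = 0
         then ([], r ++ [String.ofList (PySem.Chars.strip (flattenS (g ++ [pvPiece line])))])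
         else (flattenS (g ++ [pvPiece line]), r)) := by
      rw [flattenS_append]
      by_cases hc : PySem.Chars.endswith line.toList [' ', '\\', '\n'] = true <;>
        simp [pvStepA, pvPiece, hc, splitOn_sp]
    have hbal : b + (PySem.List.count (PySem.Chars.splitOn (pvPiece line) [' ']) ['['] : Int)
          - (PySem.List.count (PySem.Chars.splitOn (pvPiece line) [' ']) [']'] : Int)
        = (sp (flattenS (g ++ [pvPiece line]))).foldl pvBracesStepA 0 := by
      rw [flattenS_append, sp_append, List.foldl_append, ← hb, splitOn_sp, foldlA_count]
    have hstepB : pvGroupStep (g, b, r) (pvPiece line) =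
        (if (sp (flattenS (g ++ [pvPiece line]))).foldl pvBracesStepA 0 = 0
         then ([], (sp (flattenS (g ++ [pvPiece line]))).foldl pvBracesStepA 0,
               r ++ [String.ofList (PySem.Chars.strip (PySem.Chars.join [' '] (g ++ [pvPiece line])))])
         else (g ++ [pvPiece line], (sp (flattenS (g ++ [pvPiece line]))).foldl pvBracesStepA 0, r)) := by
      simp only [pvGroupStep, hbal]
    rw [hstepA, hstepB]
    by_cases h0 : (sp (flattenS (g ++ [pvPiece line]))).foldl pvBracesStepA 0 = 0
    · rw [if_pos h0, if_pos h0]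
      have hjoin : PySem.Chars.strip (flattenS (g ++ [pvPiece line]))
          = PySem.Chars.strip (PySem.Chars.join [' '] (g ++ [pvPiece line])) := by
        rw [flattenS_eq_cons_join _ (by simp), strip_cons_space]
      rw [hjoin]
      have := ih [] ((sp (flattenS (g ++ [pvPiece line]))).foldl pvBracesStepA 0)
        (r ++ [String.ofList (PySem.Chars.strip (PySem.Chars.join [' '] (g ++ [pvPiece line])))])
        (by rw [h0]; exact balA_nil.symm)
      simpa [flattenS] using this
    · rw [if_neg h0, if_neg h0]
      exact ih (g ++ [pvPiece line]) _ r rfl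

-- ===== VERDICT (by name: the statement is the Claim_ definition above) =====
theorem condense_lines_spec : Claim_equal_condense_lines := by
  intro code _
  unfold Spec_condense_lines condense_lines condense_lines_alt
  exact (key code [] 0 [] balA_nil.symm).symm
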